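-- pv_equiv track=rewrite | github.com/vekair/kkexcel | kkexcel/generate_excel.py | next_letter_sequence
-- ===== SOURCE A (Python) =====
-- def next_letter_sequence(current_str):
--     """
--     返回给定字符串的下一个字母序列。
--     例如：给定 "Z"，返回 "AA"；给定 "AZ"，返回 "BA"。
--     """
--     # 将字符串转换为列表，方便操作
--     current_list = list(current_str)
--
--     # 从字符串末尾开始处理
--     for i in range(len(current_list) - 1, -1, -1):
--         # 如果当前字符不是'Z'，则增加1并返回结果
--         if current_list[i] != 'Z':
--             current_list[i] = chr(ord(current_list[i]) + 1)
--             return ''.join(current_list)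
--         else:
--             # 如果是'Z'，则将其替换为'A'，并继续处理前一个字符
--             current_list[i] = 'A'
--
--     # 如果所有字符都是'Z'，则在前面添加一个'A'
--     return 'A' + ''.join(current_list)
-- ===== SOURCE B (Python) =====
-- def next_letter_sequence(current_str):
--     rstripped = current_str.rstrip('Z')
--     if not rstripped:
--         return 'A' * (len(current_str) + 1)
--     count = len(current_str) - len(rstripped)
--     return rstripped[:-1] + chr(ord(rstripped[-1]) + 1) + 'A' * count
-- ===== Notes on version B (the rewrite author's own statement) =====
-- stated objective: simpler
-- what changed: Replaces the end-to-front carry loop with a single rstrip('Z')-and-slice construction: count trailing Z's, bump the pivot character, append that many A's.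
import Mathlib
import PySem

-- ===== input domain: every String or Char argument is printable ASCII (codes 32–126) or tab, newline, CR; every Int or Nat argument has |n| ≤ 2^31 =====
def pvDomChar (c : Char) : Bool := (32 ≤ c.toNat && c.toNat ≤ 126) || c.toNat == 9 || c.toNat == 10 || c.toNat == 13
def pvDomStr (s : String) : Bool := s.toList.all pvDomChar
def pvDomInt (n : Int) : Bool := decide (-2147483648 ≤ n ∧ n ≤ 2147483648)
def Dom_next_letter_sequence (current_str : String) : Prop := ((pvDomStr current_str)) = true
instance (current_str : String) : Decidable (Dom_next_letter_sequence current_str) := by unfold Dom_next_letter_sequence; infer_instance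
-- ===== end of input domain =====

-- B replaces A's end-to-front carry loop with a single rstrip('Z')-and-slice construction (objective: simpler).

-- ===== PORT A =====
-- A's for-loop runs over indices from the end; ported as structural recursion over the
-- REVERSED character list, returning (reversed transformed list, did-we-return-early flag).
def pvALoop : List Char → List Char × Bool
  | [] => ([], false)
  | c :: rest =>
    if c ≠ 'Z' then (Char.ofNat (c.toNat + 1) :: rest, true)
    else
      let p := pvALoop rest
      ('A' :: p.1, p.2)

def next_letter_sequence (current_str : String) : String :=
  let p := pvALoop current_str.toList.reverse
  if p.2 then String.ofList p.1.reverse else String.ofList ('A' :: p.1.reverse)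

-- ===== PORT B =====
-- rstrip('Z') = reverse ∘ dropWhile (== 'Z') ∘ reverse; [:-1] = dropLast; [-1] = getLastD (nonempty branch).
def next_letter_sequence_alt (current_str : String) : String :=
  let cs := current_str.toList
  let rstripped := (cs.reverse.dropWhile (fun c => c == 'Z')).reverse
  if rstripped = [] then String.ofList (List.replicate (cs.length + 1) 'A')
  else
    String.ofList (rstripped.dropLast ++
      [Char.ofNat ((rstripped.getLastD 'A').toNat + 1)] ++
      List.replicate (cs.length - rstripped.length) 'A')

-- ===== PRECONDITION & SPEC =====
def Spec_next_letter_sequence (current_str : String) (out : String) : Prop := out = next_letter_sequence_alt current_str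
instance (current_str : String) (out : String) : Decidable (Spec_next_letter_sequence current_str out) := by unfold Spec_next_letter_sequence; infer_instance

-- ===== CLAIM (what is proved, stated in full; the proofs are below) =====
def Claim_equal_next_letter_sequence : Prop := ∀ (current_str : String), Dom_next_letter_sequence current_str → Spec_next_letter_sequence current_str (next_letter_sequence current_str)

-- ===== LEMMAS AND PROOFS =====

-- Both results, expressed over the reversed character list r, agree.
theorem pv_key (r : List Char) :
    (if (pvALoop r).2 then (pvALoop r).1.reverse else 'A' :: (pvALoop r).1.reverse)
    = (if ((r.dropWhile (fun c => c == 'Z')).reverse : List Char) = [] then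
         List.replicate (r.length + 1) 'A'
       else
         ((r.dropWhile (fun c => c == 'Z')).reverse).dropLast ++
           [Char.ofNat ((((r.dropWhile (fun c => c == 'Z')).reverse).getLastD 'A').toNat + 1)] ++
           List.replicate (r.length - (r.dropWhile (fun c => c == 'Z')).length) 'A') := by
  induction r with
  | nil => simp [pvALoop]
  | cons c rest ih =>
    by_cases hc : c = 'Z'
    · subst hc
      have hlen : (rest.dropWhile (fun c => c == 'Z')).length ≤ rest.length :=
        List.length_dropWhile_le _ _
      simp only [pvALoop, List.dropWhile, if_neg (by simp : ¬('Z' ≠ 'Z'))]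
      simp only [beq_self_eq_true, List.length_cons]
      by_cases hd : ((rest.dropWhile (fun c => c == 'Z')).reverse : List Char) = []
      · -- all-Z tail: both sides append one more 'A'
        rw [if_pos hd] at ih ⊢
        rcases h2 : (pvALoop rest).2 with _ | _ <;>
          simp only [h2, if_false, Bool.false_eq_true, if_true, List.reverse_cons] at ih ⊢
        · rw [← List.cons_append, ih, ← List.replicate_succ']
        · rw [ih, ← List.replicate_succ']
      · rw [if_neg hd] at ih ⊢
        have hsub : rest.length + 1 - (rest.dropWhile (fun c => c == 'Z')).length
            = (rest.length - (rest.dropWhile (fun c => c == 'Z')).length) + 1 := by omega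
        rcases h2 : (pvALoop rest).2 with _ | _ <;>
          simp only [h2, if_false, Bool.false_eq_true, if_true, List.reverse_cons] at ih ⊢
        · rw [hsub, List.replicate_succ', ← List.cons_append, ih]
          simp [List.append_assoc]
        · rw [hsub, List.replicate_succ', ih]
          simp [List.append_assoc]
    · -- pivot found at the head of the reversed list
      simp only [pvALoop, List.dropWhile, if_pos hc]
      have hbeq : (c == 'Z') = false := by simpa using hc
      simp [hbeq, List.reverse_cons]

-- ===== VERDICT (by name: the statement is the Claim_ definition above) =====
theorem next_letter_sequence_spec : Claim_equal_next_letter_sequence := by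
  intro s _
  unfold Spec_next_letter_sequence next_letter_sequence next_letter_sequence_alt
  dsimp only
  have h := pv_key s.toList.reverse
  simp only [List.length_reverse] at h
  split <;> split <;> simp_all
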